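-- pv_equiv track=rewrite | github.com/humemai/humemdb | scripts/benchmarks/vector_search_real.py | _memory_stage_deltas
-- ===== SOURCE A (Python) =====
-- _MEMORY_SNAPSHOT_ORDER = (
--     "start",
--     "after_subset_plan",
--     "after_query_selection",
--     "after_filter_candidate_selection",
--     "after_dataset_load",
--     "after_sqlite_seed",
--     "after_sqlite_exact_load",
--     "after_numpy_query_materialize",
--     "after_numpy_exact_build",
--     "after_lancedb_table_create",
--     "after_lancedb_ingest_first_batch",
--     "after_lancedb_ingest_peak",
--     "after_lancedb_ingest_complete",
--     "after_duckdb_arrow_export",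
--     "after_lancedb_index_build",
--     "after_lancedb_scalar_index_build",
--     "after_numpy_exact_search",
--     "after_lancedb_indexed_search",
--     "after_query_and_recall",
--     "final",
-- )
--
-- def _memory_stage_deltas(
--     snapshots: dict[str, int | None],
-- ) -> dict[str, int | None]:
--     deltas: dict[str, int | None] = {}
--     previous_value: int | None = None
--     previous_name: str | None = None
--     for name in _MEMORY_SNAPSHOT_ORDER:
--         if name not in snapshots:
--             continue
--         current_value = snapshots[name]
--         if previous_value is None or current_value is None:
--             deltas[name] = None
--         else:
--             deltas[name] = current_value - previous_value
--         previous_value = current_value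
--         previous_name = name
--     if previous_name is None:
--         return deltas
--     return deltas
-- ===== SOURCE B (Python) =====
-- _MEMORY_SNAPSHOT_ORDER = (
--     "start",
--     "after_subset_plan",
--     "after_query_selection",
--     "after_filter_candidate_selection",
--     "after_dataset_load",
--     "after_sqlite_seed",
--     "after_sqlite_exact_load",
--     "after_numpy_query_materialize",
--     "after_numpy_exact_build",
--     "after_lancedb_table_create",
--     "after_lancedb_ingest_first_batch",
--     "after_lancedb_ingest_peak",
--     "after_lancedb_ingest_complete",
--     "after_duckdb_arrow_export",
--     "after_lancedb_index_build",
--     "after_lancedb_scalar_index_build",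
--     "after_numpy_exact_search",
--     "after_lancedb_indexed_search",
--     "after_query_and_recall",
--     "final",
-- )
--
--
-- def _memory_stage_deltas(
--     snapshots: "dict[str, int | None]",
-- ) -> "dict[str, int | None]":
--     # Recursively build the (name, delta) pair list over the canonical order,
--     # then turn it into a dict in one shot at the end.
--     def pairs(names, prev):
--         if not names:
--             return []
--         name, rest = names[0], names[1:]
--         if name not in snapshots:
--             return pairs(rest, prev)
--         cur = snapshots[name]
--         delta = None if prev is None or cur is None else cur - prev
--         return [(name, delta)] + pairs(rest, cur)
--
--     return dict(pairs(list(_MEMORY_SNAPSHOT_ORDER), None))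
-- ===== Notes on version B (the rewrite author's own statement) =====
-- stated objective: simpler
-- what changed: Replaces A's iterative loop that threads a deltas-dict plus previous_value/previous_name state by a structural recursion over the canonical order that returns the (name, delta) pair list directly and builds the dict once at the end with dict(...).
import Mathlib
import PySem

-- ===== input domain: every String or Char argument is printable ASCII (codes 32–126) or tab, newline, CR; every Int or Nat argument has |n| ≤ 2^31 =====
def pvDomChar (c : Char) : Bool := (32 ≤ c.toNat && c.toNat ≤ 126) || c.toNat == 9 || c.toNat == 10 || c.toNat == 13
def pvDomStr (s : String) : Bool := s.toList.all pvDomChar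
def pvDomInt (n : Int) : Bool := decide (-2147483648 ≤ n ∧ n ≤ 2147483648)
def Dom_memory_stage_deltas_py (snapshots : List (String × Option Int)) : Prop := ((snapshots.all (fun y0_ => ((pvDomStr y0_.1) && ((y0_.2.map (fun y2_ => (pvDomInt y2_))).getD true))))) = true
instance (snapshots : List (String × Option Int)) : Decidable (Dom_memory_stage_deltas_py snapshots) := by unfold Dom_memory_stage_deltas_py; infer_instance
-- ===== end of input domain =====

-- B replaces A's accumulator-threaded dict-building loop by a structural recursion that
-- returns the (name, delta) pair list directly (skipping absent names) and converts it to
-- a dict once at the end: a simpler decomposition.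


def memorySnapshotOrderA : List String :=
  ["start", "after_subset_plan", "after_query_selection", "after_filter_candidate_selection",
   "after_dataset_load", "after_sqlite_seed", "after_sqlite_exact_load",
   "after_numpy_query_materialize", "after_numpy_exact_build", "after_lancedb_table_create",
   "after_lancedb_ingest_first_batch", "after_lancedb_ingest_peak", "after_lancedb_ingest_complete",
   "after_duckdb_arrow_export", "after_lancedb_index_build", "after_lancedb_scalar_index_build",
   "after_numpy_exact_search", "after_lancedb_indexed_search", "after_query_and_recall", "final"]

-- ===== PORT A =====
-- state: (deltas, previous_value, previous_name), threaded through the loop over the order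
def memory_stage_deltas_py (snapshots : List (String × Option Int)) : List (String × Option Int) :=
  let snaps := PySem.Dict.mk snapshots
  let st := memorySnapshotOrderA.foldl
    (fun (st : PySem.Dict String (Option Int) × Option Int × Option String) name =>
      if snaps.contains name = false then st     -- 'if name not in snapshots: continue'
      else
        let current_value := snaps.getD name none
        let deltas :=
          match st.2.1, current_value with       -- 'if previous_value is None or current_value is None'
          | some a, some b => st.1.insert name (some (b - a))
          | _, _ => st.1.insert name none
        (deltas, current_value, some name))
    (PySem.Dict.empty, none, none)
  if st.2.2 = none then st.1.items else st.1.items   -- 'if previous_name is None: return deltas; return deltas'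

def memorySnapshotOrderB : List String :=
  ["start", "after_subset_plan", "after_query_selection", "after_filter_candidate_selection",
   "after_dataset_load", "after_sqlite_seed", "after_sqlite_exact_load",
   "after_numpy_query_materialize", "after_numpy_exact_build", "after_lancedb_table_create",
   "after_lancedb_ingest_first_batch", "after_lancedb_ingest_peak", "after_lancedb_ingest_complete",
   "after_duckdb_arrow_export", "after_lancedb_index_build", "after_lancedb_scalar_index_build",
   "after_numpy_exact_search", "after_lancedb_indexed_search", "after_query_and_recall", "final"]

-- ===== PORT B =====
-- 'def pairs(names, prev)': structural recursion returning the (name, delta) pair list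
def pvPairsB (snaps : PySem.Dict String (Option Int)) : List String → Option Int → List (String × Option Int)
  | [], _ => []
  | name :: rest, prev =>
    if snaps.contains name = false then pvPairsB snaps rest prev
    else
      let cur := snaps.getD name none
      let delta : Option Int :=
        match prev with        -- 'None if prev is None or cur is None else cur - prev'
        | none => none
        | some a =>
          match cur with
          | none => none
          | some b => some (b - a)
      (name, delta) :: pvPairsB snaps rest cur

def memory_stage_deltas_py_alt (snapshots : List (String × Option Int)) : List (String × Option Int) :=
  let snaps := PySem.Dict.mk snapshots
  -- 'dict(pairs(...))': fold the pair list into a dict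
  ((pvPairsB snaps memorySnapshotOrderB none).foldl
    (fun (d : PySem.Dict String (Option Int)) p => d.insert p.1 p.2) PySem.Dict.empty).items

-- ===== PRECONDITION & SPEC =====
def Spec_memory_stage_deltas_py (snapshots : List (String × Option Int)) (out : List (String × Option Int)) : Prop := out = memory_stage_deltas_py_alt snapshots
instance (snapshots : List (String × Option Int)) (out : List (String × Option Int)) : Decidable (Spec_memory_stage_deltas_py snapshots out) := by unfold Spec_memory_stage_deltas_py; infer_instance

-- ===== CLAIM (what is proved, stated in full; the proofs are below) =====
def Claim_equal_memory_stage_deltas_py : Prop := ∀ (snapshots : List (String × Option Int)), Dom_memory_stage_deltas_py snapshots → Spec_memory_stage_deltas_py snapshots (memory_stage_deltas_py snapshots)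

-- ===== LEMMAS AND PROOFS =====

theorem pvPairsB_keys_sublist (snaps : PySem.Dict String (Option Int)) (L : List String)
    (pv : Option Int) : ((pvPairsB snaps L pv).map Prod.fst).Sublist L := by
  induction L generalizing pv with
  | nil => simp [pvPairsB]
  | cons n ns ih =>
    rw [pvPairsB]
    split
    · exact (ih pv).cons n
    · simpa using (ih (snaps.getD n none)).cons₂ n

theorem pvA_loop (snaps : PySem.Dict String (Option Int)) (L : List String)
    (d : PySem.Dict String (Option Int)) (pv : Option Int) (pn : Option String)
    (hnd : L.Nodup) (hfresh : ∀ n ∈ L, d.contains n = false) :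
    (L.foldl
      (fun (st : PySem.Dict String (Option Int) × Option Int × Option String) name =>
        if snaps.contains name = false then st
        else
          let current_value := snaps.getD name none
          let deltas :=
            match st.2.1, current_value with
            | some a, some b => st.1.insert name (some (b - a))
            | _, _ => st.1.insert name none
          (deltas, current_value, some name))
      (d, pv, pn)).1.items
      = d.items ++ pvPairsB snaps L pv := by
  induction L generalizing d pv pn with
  | nil => simp [pvPairsB]
  | cons n ns ih =>
    simp only [List.foldl_cons]
    rw [pvPairsB]
    rcases hn : snaps.contains n with _ | _
    · simp only [if_true]
      exact ih d pv pn hnd.of_cons (fun m hm => hfresh m (List.mem_cons_of_mem _ hm))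
    · have hfn : d.contains n = false := hfresh n (List.mem_cons_self ..)
      have hfresh' : ∀ (v : Option Int), ∀ m ∈ ns, (d.insert n v).contains m = false := by
        intro v m hm
        have hmn : (m == n) = false := by
          simp only [beq_eq_false_iff_ne]
          exact fun h => (List.nodup_cons.mp hnd).1 (h ▸ hm)
        simp [PySem.Dict.contains_insert, hmn, hfresh m (List.mem_cons_of_mem _ hm)]
      have hins : ∀ v : Option Int, (d.insert n v).items = d.items ++ [(n, v)] :=
        fun v => PySem.Dict.items_insert_of_not_contains d v hfn
      rw [if_neg (by simp [hn])]
      rcases pv with _ | a <;> rcases hcv : snaps.getD n none with _ | b <;>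
        rw [ih _ _ _ hnd.of_cons (hfresh' _)] <;>
        simp [hn, hcv, hins]

theorem memoryOrder_nodup : memorySnapshotOrderA.Nodup := by decide

theorem memoryOrderB_eq : memorySnapshotOrderB = memorySnapshotOrderA := rfl

-- ===== VERDICT (by name: the statement is the Claim_ definition above) =====
theorem memory_stage_deltas_py_spec : Claim_equal_memory_stage_deltas_py := by
  intro snapshots _
  unfold Spec_memory_stage_deltas_py memory_stage_deltas_py memory_stage_deltas_py_alt
  set snaps := PySem.Dict.mk snapshots with hsnaps
  have hA := pvA_loop snaps memorySnapshotOrderA PySem.Dict.empty none none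
    memoryOrder_nodup (by simp)
  have hknd : ((pvPairsB snaps memorySnapshotOrderB none).map Prod.fst).Nodup :=
    (pvPairsB_keys_sublist snaps memorySnapshotOrderB none).nodup (memoryOrderB_eq ▸ memoryOrder_nodup)
  have hB := PySem.Dict.items_foldl_insert_fresh
    (l := pvPairsB snaps memorySnapshotOrderB none) (k := Prod.fst) (v := Prod.snd)
    (d := PySem.Dict.empty) (by simp) hknd
  simp only [memoryOrderB_eq] at *
  simp [hA, hB, ite_self]
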